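-- pv_equiv track=rewrite | github.com/signalwolf/Algorithm | stack/单调栈_folder/84. Largest Rectangle in Histogram.py | helper
-- ===== SOURCE A (Python) =====
-- def helper(A):
--     # input: list of ints
--     # output: list of ints
--     ans = [0] * len(A)
--     stack = []
--     for i, val in enumerate(A):
--         prev = i
--         while stack and A[stack[-1]] >= val:
--             prev = stack.pop()
--         ans[i] = (i - prev) + ans[prev]
--         stack.append(i)
--     return ans
-- ===== SOURCE B (Python) =====
-- def helper(A):
--     # input: list of ints
--     # output: list of ints
--     res = []
--     for i, v in enumerate(A):
--         run = 0
--         for x in reversed(A[:i]):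
--             if x < v:
--                 break
--             run += 1
--         res.append(run)
--     return res
-- ===== Notes on version B (the rewrite author's own statement) =====
-- stated objective: simpler
-- what changed: Replaces the amortized monotonic-stack recurrence ans[i]=(i-prev)+ans[prev] with a direct backward scan per index that counts the contiguous run of preceding elements >= A[i].
import Mathlib
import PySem

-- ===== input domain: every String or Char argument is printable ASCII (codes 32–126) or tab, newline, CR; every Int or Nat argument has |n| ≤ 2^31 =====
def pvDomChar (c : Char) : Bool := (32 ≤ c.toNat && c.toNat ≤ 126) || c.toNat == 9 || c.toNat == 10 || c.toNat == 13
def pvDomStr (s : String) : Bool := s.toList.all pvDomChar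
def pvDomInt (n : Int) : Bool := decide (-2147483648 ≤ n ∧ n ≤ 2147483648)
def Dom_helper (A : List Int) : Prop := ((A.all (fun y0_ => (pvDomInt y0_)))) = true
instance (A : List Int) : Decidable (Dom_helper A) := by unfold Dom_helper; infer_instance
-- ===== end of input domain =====

-- B replaces A's monotonic-stack recurrence by a direct backward scan per index
-- counting the contiguous run of preceding elements ≥ A[i]; objective: simpler.

-- ===== PORT A =====
-- the Python stack has its top at the END; the port keeps the top at the HEAD of the list
-- (stack.pop() / stack[-1] / stack.append(i) become head-pattern / head / cons)
def popLoop (A : List Int) (val : Int) : List Int → Int → List Int × Int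
  | [], prev => ([], prev)
  | t :: rest, prev =>
    if val ≤ PySem.List.pyGetD A t 0 then popLoop A val rest t else (t :: rest, prev)

def helperStep (A : List Int) (st : List Int × List Int) (iv : Int × Int) : List Int × List Int :=
  let sp := popLoop A iv.2 st.2 iv.1
  (PySem.List.pySetD st.1 iv.1 ((iv.1 - sp.2) + PySem.List.pyGetD st.1 sp.2 0), iv.1 :: sp.1)

def helper (A : List Int) : List Int :=
  (List.foldl (helperStep A) (List.replicate A.length 0, []) (PySem.List.enumerate A 0)).1

-- ===== PORT B =====
-- Source B: for each (i, v) in enumerate(A): count over reversed(A[:i]) until the first x < v (break)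
def helper_alt (A : List Int) : List Int :=
  (PySem.List.enumerate A 0).map (fun iv =>
    (((PySem.List.slice A none (some iv.1)).reverse.takeWhile (fun x => decide (iv.2 ≤ x))).length : Int))

-- ===== PRECONDITION & SPEC =====
def Spec_helper (A : List Int) (out : List Int) : Prop := out = helper_alt A
instance (A : List Int) (out : List Int) : Decidable (Spec_helper A out) := by unfold Spec_helper; infer_instance

-- ===== CLAIM (what is proved, stated in full; the proofs are below) =====
def Claim_equal_helper : Prop := ∀ (A : List Int), Dom_helper A → Spec_helper A (helper A)

-- ===== LEMMAS AND PROOFS =====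

-- the value B computes at index j: length of the run of elements ≥ A[j] just before j
def spanV (A : List Int) (j : Nat) : Nat :=
  ((A.take j).reverse.takeWhile (fun x => decide (A.getD j 0 ≤ x))).length

-- generic takeWhile facts (stated with getD to stay proof-friendly)
theorem tw_le {α : Type} (p : α → Bool) (l : List α) : (l.takeWhile p).length ≤ l.length := by
  induction l with
  | nil => simp
  | cons a l ih =>
    by_cases hpa : p a = true
    · simp only [List.takeWhile, hpa, List.length_cons]; omega
    · have hpa' : p a = false := by simpa using hpa
      simp [List.takeWhile, hpa']

theorem tw_run {α : Type} (p : α → Bool) (d0 : α) :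
    ∀ (l : List α) (d : Nat), d < (l.takeWhile p).length → p (l.getD d d0) = true := by
  intro l
  induction l with
  | nil => intro d hd; simp at hd
  | cons a l ih =>
    intro d hd
    by_cases hpa : p a = true
    · cases d with
      | zero => simpa using hpa
      | succ d =>
        simp only [List.takeWhile, hpa, List.length_cons] at hd
        simpa using ih d (by omega)
    · have hpa' : p a = false := by simpa using hpa
      simp [List.takeWhile, hpa'] at hd

theorem tw_eq {α : Type} (p : α → Bool) (d0 : α) :
    ∀ (l : List α) (k : Nat), k ≤ l.length →
      (∀ d, d < k → p (l.getD d d0) = true) →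
      (k = l.length ∨ p (l.getD k d0) = false) →
      (l.takeWhile p).length = k := by
  intro l
  induction l with
  | nil =>
    intro k hk _ _
    simp at hk ⊢
    omega
  | cons a l ih =>
    intro k hk h1 h2
    cases k with
    | zero =>
      rcases h2 with h2 | h2
      · simp at h2
      · simp only [List.getD_cons_zero] at h2
        simp [List.takeWhile, h2]
    | succ k =>
      have hpa : p a = true := by simpa using h1 0 (by omega)
      simp only [List.takeWhile, hpa, List.length_cons]
      rw [ih k (by simpa using hk) (fun d hd => by simpa using h1 (d+1) (by omega))]
      rcases h2 with h2 | h2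
      · left; simpa using h2
      · right; simpa using h2

theorem revtake_len (A : List Int) (j : Nat) (hj : j ≤ A.length) :
    ((A.take j).reverse).length = j := by
  simp [List.length_take, hj]

theorem getD_revtake (A : List Int) (j d : Nat) (d0 : Int) (hd : d < j) (hj : j ≤ A.length) :
    ((A.take j).reverse).getD d d0 = A.getD (j - 1 - d) d0 := by
  have h1 : d < (A.take j).length := by
    simp only [List.length_take]
    omega
  rw [List.getD_eq_getElem?_getD, List.getD_eq_getElem?_getD, List.getElem?_reverse h1]
  have h2 : (A.take j).length - 1 - d = j - 1 - d := by
    simp only [List.length_take]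
    omega
  rw [h2, List.getElem?_take_of_lt (by omega)]

theorem span_le (A : List Int) (j : Nat) (hj : j ≤ A.length) : spanV A j ≤ j := by
  have := tw_le (fun x => decide (A.getD j 0 ≤ x)) ((A.take j).reverse)
  rwa [revtake_len A j hj] at this

theorem span_run (A : List Int) (j d : Nat) (hj : j ≤ A.length) (hd : d < spanV A j) :
    A.getD j 0 ≤ A.getD (j - 1 - d) 0 := by
  have h := tw_run (fun x => decide (A.getD j 0 ≤ x)) 0 ((A.take j).reverse) d hd
  have hdj : d < j := lt_of_lt_of_le hd (span_le A j hj)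
  rw [getD_revtake A j d 0 hdj hj] at h
  simpa using h

theorem span_eq (A : List Int) (j k : Nat) (hj : j ≤ A.length) (hk : k ≤ j)
    (hrun : ∀ d, d < k → A.getD j 0 ≤ A.getD (j - 1 - d) 0)
    (hstop : k = j ∨ A.getD (j - 1 - k) 0 < A.getD j 0) :
    spanV A j = k := by
  apply tw_eq (fun x => decide (A.getD j 0 ≤ x)) 0
  · rw [revtake_len A j hj]; exact hk
  · intro d hd
    rw [getD_revtake A j d 0 (by omega) hj]
    simpa using hrun d hd
  · rcases hstop with h | h
    · left; rw [revtake_len A j hj]; exact h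
    · rcases Nat.lt_or_ge k j with hkj | hkj
      · right
        rw [getD_revtake A j k 0 hkj hj]
        simpa using not_le.mpr h
      · left; rw [revtake_len A j hj]; omega

-- invariant of A's stack: consecutive entries are linked by the span recurrence,
-- and the bottom entry's run reaches index 0
def chainV (A : List Int) : List Nat → Prop
  | [] => True
  | [b] => spanV A b = b
  | t :: p :: r => t = p + 1 + spanV A t ∧ chainV A (p :: r)

theorem getD_set_eq (l : List Int) (n : Nat) (x : Int) (h : n < l.length) :
    (l.set n x).getD n 0 = x := by
  rw [List.getD_eq_getElem?_getD, List.getElem?_set_self h]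
  rfl

theorem getD_set_ne (l : List Int) (n m : Nat) (x : Int) (h : n ≠ m) :
    (l.set n x).getD m 0 = l.getD m 0 := by
  rw [List.getD_eq_getElem?_getD, List.getElem?_set_ne h, ← List.getD_eq_getElem?_getD]

theorem pop_spec (A : List Int) (v : Int) (i : Nat) (hi : i ≤ A.length)
    (hvv : v = A.getD i 0) :
    ∀ (S : List Nat) (prev : Nat), prev < i →
    (∀ k, prev ≤ k → k < i → v ≤ A.getD k 0) →
    chainV A (prev :: S) →
    ∃ (S' : List Nat) (prev' : Nat),
      popLoop A v (S.map (fun n : Nat => (n : Int))) (prev : Int)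
        = (S'.map (fun n : Nat => (n : Int)), (prev' : Int)) ∧
      prev' ≤ prev ∧
      spanV A i = (i - prev') + spanV A prev' ∧
      (∀ x ∈ S', x ∈ S) ∧
      chainV A (i :: S') := by
  subst hvv
  intro S
  induction S with
  | nil =>
    intro prev hpi hrun hch
    have hsp : spanV A prev = prev := by simpa [chainV] using hch
    have hspi : spanV A i = i := by
      apply span_eq A i i hi (le_refl _)
      · intro d hd
        rcases Nat.lt_or_ge (i - 1 - d) prev with hlt | hge
        · have h1 := span_run A prev (prev - 1 - (i - 1 - d)) (by omega) (by rw [hsp]; omega)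
          have he : prev - 1 - (prev - 1 - (i - 1 - d)) = i - 1 - d := by omega
          rw [he] at h1
          exact le_trans (hrun prev (le_refl _) hpi) h1
        · exact hrun _ hge (by omega)
      · left; rfl
    refine ⟨[], prev, rfl, le_refl _, by rw [hspi, hsp]; omega, by simp, ?_⟩
    exact hspi
  | cons t rest ih =>
    intro prev hpi hrun hch
    obtain ⟨hpt, hct⟩ : prev = t + 1 + spanV A prev ∧ chainV A (t :: rest) := by
      simpa [chainV] using hch
    simp only [List.map_cons, popLoop, PySem.List.pyGetD_natCast]
    by_cases hv : A.getD i 0 ≤ A.getD t 0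
    · rw [if_pos hv]
      have hrun' : ∀ k, t ≤ k → k < i → A.getD i 0 ≤ A.getD k 0 := by
        intro k hk1 hk2
        rcases Nat.lt_or_ge k prev with hkp | hkp
        · rcases Nat.eq_or_lt_of_le hk1 with he | hlt
          · rw [← he]; exact hv
          · have hd : prev - 1 - k < spanV A prev := by omega
            have h1 := span_run A prev (prev - 1 - k) (by omega) hd
            have he2 : prev - 1 - (prev - 1 - k) = k := by omega
            rw [he2] at h1
            exact le_trans (hrun prev (le_refl _) hpi) h1
        · exact hrun k hkp hk2
      obtain ⟨S', prev', heq, hle, hspan, hsub, hchn⟩ := ih t (by omega) hrun' hct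
      exact ⟨S', prev', heq, by omega, hspan,
        fun x hx => List.mem_cons_of_mem _ (hsub x hx), hchn⟩
    · rw [if_neg hv]
      have hsple : spanV A prev ≤ prev := by omega
      have hspan : spanV A i = (i - prev) + spanV A prev := by
        apply span_eq A i _ hi (by omega)
        · intro d hd
          rcases Nat.lt_or_ge d (i - prev) with h1 | h1
          · exact hrun _ (by omega) (by omega)
          · have hd' : d - (i - prev) < spanV A prev := by omega
            have h2 := span_run A prev (d - (i - prev)) (by omega) hd'
            have he : prev - 1 - (d - (i - prev)) = i - 1 - d := by omega
            rw [he] at h2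
            exact le_trans (hrun prev (le_refl _) hpi) h2
        · right
          have ht : i - 1 - ((i - prev) + spanV A prev) = t := by omega
          rw [ht]
          exact not_le.mp hv
      refine ⟨t :: rest, prev, rfl, le_refl _, hspan, fun x hx => hx, ?_⟩
      constructor
      · omega
      · exact hct

-- the full loop invariant
def InvV (A : List Int) (i : Nat) (ans stack : List Int) : Prop :=
  ans.length = A.length ∧
  (∀ j : Nat, j < i → ans.getD j 0 = ((spanV A j : Nat) : Int)) ∧
  (∀ j : Nat, i ≤ j → ans.getD j 0 = 0) ∧
  ∃ S : List Nat, stack = S.map (fun n : Nat => (n : Int)) ∧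
    (∀ x ∈ S, x < i) ∧
    ((i = 0 ∧ S = []) ∨ (i ≠ 0 ∧ ∃ r, S = (i - 1) :: r)) ∧
    chainV A S

theorem step_spec (A : List Int) (i : Nat) (hi : i < A.length) (ans stack : List Int)
    (h : InvV A i ans stack) :
    InvV A (i + 1) (helperStep A (ans, stack) ((i : Int), A.getD i 0)).1
      (helperStep A (ans, stack) ((i : Int), A.getD i 0)).2 := by
  obtain ⟨hlen, hprev, hzero, S, hstack, hbnd, hshape, hch⟩ := h
  subst hstack
  -- obtain the popLoop result as (S', prev') with its properties
  have key : ∃ (S' : List Nat) (prev' : Nat),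
      popLoop A (A.getD i 0) (S.map (fun n : Nat => (n : Int))) (i : Int)
        = (S'.map (fun n : Nat => (n : Int)), (prev' : Int)) ∧
      prev' ≤ i ∧
      spanV A i = (i - prev') + spanV A prev' ∧
      (prev' = i → spanV A i = 0) ∧
      (∀ x ∈ S', x < i) ∧
      chainV A (i :: S') := by
    rcases hshape with ⟨hi0, hS⟩ | ⟨hi0, r, hS⟩
    · subst hS
      have hsp0 : spanV A i = 0 := by subst hi0; simp [spanV]
      refine ⟨[], i, rfl, le_refl _, by omega, fun _ => hsp0, by simp, ?_⟩
      subst hi0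
      exact (by simp [spanV] : spanV A 0 = 0)
    · subst hS
      simp only [List.map_cons, popLoop, PySem.List.pyGetD_natCast]
      by_cases hv : A.getD i 0 ≤ A.getD (i - 1) 0
      · rw [if_pos hv]
        obtain ⟨S', prev', heq, hle, hspan, hsub, hchn⟩ :=
          pop_spec A (A.getD i 0) i (by omega) rfl r (i - 1) (by omega)
            (fun k hk1 hk2 => by
              have : k = i - 1 := by omega
              rw [this]; exact hv)
            hch
        exact ⟨S', prev', heq, by omega, hspan, by intro hc; omega,
          fun x hx => by have := hbnd x (List.mem_cons_of_mem _ (hsub x hx)); omega, hchn⟩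
      · rw [if_neg hv]
        have hspi : spanV A i = 0 := by
          apply span_eq A i 0 (by omega) (by omega) (by intro d hd; omega)
          right
          simpa using not_le.mp hv
        refine ⟨(i - 1) :: r, i, rfl, le_refl _, by omega, fun _ => hspi,
          fun x hx => hbnd x hx, ?_⟩
        obtain ⟨hh, hcr⟩ : i - 1 = i - 1 ∧ chainV A ((i - 1) :: r) := ⟨rfl, hch⟩
        constructor
        · omega
        · exact hcr
  obtain ⟨S', prev', heq, hple, hspan, hz, hbnd', hchn⟩ := key
  have hstep : helperStep A (ans, S.map (fun n : Nat => (n : Int))) ((i : Int), A.getD i 0)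
      = (PySem.List.pySetD ans (i : Int) (((i : Int) - (prev' : Int))
          + PySem.List.pyGetD ans (prev' : Int) 0), (i : Int) :: S'.map (fun n : Nat => (n : Int))) := by
    simp only [helperStep, heq]
  rw [hstep]
  rw [show ((i : Int) :: S'.map (fun n : Nat => (n : Int))) = (i :: S').map (fun n : Nat => (n : Int)) from rfl]
  simp only [PySem.List.pySetD_natCast, PySem.List.pyGetD_natCast]
  -- value written at i is span i
  have hval : ((i : Int) - (prev' : Int)) + ans.getD prev' 0 = ((spanV A i : Nat) : Int) := by
    rcases Nat.eq_or_lt_of_le hple with he | hlt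
    · have h0 : ans.getD prev' 0 = 0 := hzero prev' (by omega)
      rw [h0, he, hz he]
      push_cast
      ring
    · have h0 : ans.getD prev' 0 = ((spanV A prev' : Nat) : Int) := hprev prev' hlt
      rw [h0, hspan]
      push_cast [Nat.cast_sub hple]
      ring
  refine ⟨by simp [hlen], ?_, ?_, i :: S', rfl, ?_, ?_, hchn⟩
  · intro j hj
    rcases Nat.lt_or_ge j i with hji | hji
    · rw [getD_set_ne ans i j _ (by omega)]
      exact hprev j hji
    · have : j = i := by omega
      subst this
      rw [getD_set_eq ans j _ (by omega), hval]
  · intro j hj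
    rw [getD_set_ne ans i j _ (by omega)]
    exact hzero j (by omega)
  · intro x hx
    rcases hx with _ | hx
    · omega
    · have := hbnd' x (by assumption)
      omega
  · right
    exact ⟨by omega, S', by simp⟩

theorem loop_spec (A : List Int) : ∀ (l : List Int) (i : Nat) (ans stack : List Int),
    A.drop i = l → i ≤ A.length → InvV A i ans stack →
    InvV A A.length
      (List.foldl (helperStep A) (ans, stack) (PySem.List.enumerate l (i : Int))).1
      (List.foldl (helperStep A) (ans, stack) (PySem.List.enumerate l (i : Int))).2 := by
  intro l
  induction l with
  | nil =>
    intro i ans stack hdrop hile hinv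
    have h0 : A.length - i = 0 := by
      have := congrArg List.length hdrop
      simpa [List.length_drop] using this
    have : i = A.length := by omega
    subst this
    simpa [PySem.List.enumerate] using hinv
  | cons x l ih =>
    intro i ans stack hdrop hile hinv
    have hlen := congrArg List.length hdrop
    simp only [List.length_drop, List.length_cons] at hlen
    have hi : i < A.length := by omega
    have hx : A.getD i 0 = x := by
      have h0 : (A.drop i)[0]? = some x := by rw [hdrop]; rfl
      rw [List.getElem?_drop] at h0
      rw [List.getD_eq_getElem?_getD]
      simpa using congrArg (fun o => o.getD (0:Int)) h0
    have hdrop' : A.drop (i + 1) = l := by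
      have : A.drop (i + 1) = List.drop 1 (A.drop i) := by
        rw [List.drop_drop]
      rw [this, hdrop]
      rfl
    rw [PySem.List.enumerate_cons, List.foldl_cons]
    have hcast : (i : Int) + 1 = ((i + 1 : Nat) : Int) := by push_cast; ring
    rw [hcast]
    have hstep := step_spec A i hi ans stack hinv
    rw [hx] at hstep
    have := ih (i + 1) (helperStep A (ans, stack) ((i : Int), x)).1
      (helperStep A (ans, stack) ((i : Int), x)).2 hdrop' (by omega) hstep
    simpa using this

theorem helper_alt_getElem? (A : List Int) (j : Nat) (hj : j < A.length) :
    (helper_alt A)[j]? = some ((spanV A j : Nat) : Int) := by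
  unfold helper_alt
  rw [List.getElem?_map, PySem.List.getElem?_enumerate]
  rw [List.getElem?_eq_getElem hj]
  simp only [Option.map_some]
  congr 1
  have hidx : (0 : Int) + (j : Int) = ((j : Nat) : Int) := by ring
  rw [hidx, PySem.List.slice_to_natCast]
  rw [show A[j] = A.getD j 0 from (List.getD_eq_getElem A 0 hj).symm]
  rfl

-- ===== VERDICT (by name: the statement is the Claim_ definition above) =====
theorem helper_spec : Claim_equal_helper := by
  intro A _
  unfold Spec_helper
  have h0 : InvV A 0 (List.replicate A.length 0) [] := by
    refine ⟨by simp, by omega, ?_, [], rfl, by simp, Or.inl ⟨rfl, rfl⟩, trivial⟩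
    intro j _
    rw [List.getD_eq_getElem?_getD, List.getElem?_replicate]
    split <;> rfl
  have hmain := loop_spec A A 0 (List.replicate A.length 0) [] (by simp) (by omega) h0
  rw [show ((0 : Nat) : Int) = (0 : Int) from rfl] at hmain
  obtain ⟨hlen, hsp, -, -⟩ := hmain
  apply List.ext_getElem?
  intro j
  by_cases hj : j < A.length
  · have h1 : (helper A)[j]? = some ((helper A).getD j 0) := by
      have hj' : j < (helper A).length := by
        unfold helper
        omega
      rw [List.getD_eq_getElem (helper A) 0 hj', List.getElem?_eq_getElem hj']
    rw [h1, helper_alt_getElem? A j hj]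
    congr 1
    exact hsp j hj
  · rw [List.getElem?_eq_none, List.getElem?_eq_none]
    · unfold helper_alt
      rw [List.length_map, PySem.List.length_enumerate]
      omega
    · unfold helper
      omega
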